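-- pv_equiv track=rewrite | github.com/Paragkoche/cscpr | pr3.py | row_column_transformation
-- ===== SOURCE A (Python) =====
-- def transpose_matrix(matrix):
--     return [''.join(row) for row in zip(*matrix)]
--
-- def row_column_transformation(ciphertext: str, num_rails: int) -> str:
--     num_cols = len(ciphertext) // num_rails
--     if len(ciphertext) % num_rails != 0:
--         num_cols += 1
--
--
--     rail_matrix = [['' for _ in range(num_cols)] for _ in range(num_rails)]
--     index = 0
--
--     for i in range(num_rails):
--         for j in range(num_cols):
--             if index < len(ciphertext):
--                 rail_matrix[i][j] = ciphertext[index]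
--                 index += 1
--
--
--     transposed_matrix = transpose_matrix(rail_matrix)
--
--
--     transformed_text = ''.join(''.join(row) for row in transposed_matrix)
--     return transformed_text
-- ===== SOURCE B (Python) =====
-- def row_column_transformation(ciphertext: str, num_rails: int) -> str:
--     num_cols = len(ciphertext) // num_rails
--     if len(ciphertext) % num_rails != 0:
--         num_cols += 1
--     n = len(ciphertext)
--     chars = []
--     for j in range(num_cols):
--         for i in range(num_rails):
--             idx = i * num_cols + j
--             if idx < n:
--                 chars.append(ciphertext[idx])
--     return ''.join(chars)
-- ===== Notes on version B (the rewrite author's own statement) =====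
-- stated objective: faster
-- what changed: B eliminates the 2D rail matrix and the zip-based transpose entirely: it reads the characters directly in column-major order with a single nested index loop (idx = i*num_cols + j), appending only existing positions.
import Mathlib
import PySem

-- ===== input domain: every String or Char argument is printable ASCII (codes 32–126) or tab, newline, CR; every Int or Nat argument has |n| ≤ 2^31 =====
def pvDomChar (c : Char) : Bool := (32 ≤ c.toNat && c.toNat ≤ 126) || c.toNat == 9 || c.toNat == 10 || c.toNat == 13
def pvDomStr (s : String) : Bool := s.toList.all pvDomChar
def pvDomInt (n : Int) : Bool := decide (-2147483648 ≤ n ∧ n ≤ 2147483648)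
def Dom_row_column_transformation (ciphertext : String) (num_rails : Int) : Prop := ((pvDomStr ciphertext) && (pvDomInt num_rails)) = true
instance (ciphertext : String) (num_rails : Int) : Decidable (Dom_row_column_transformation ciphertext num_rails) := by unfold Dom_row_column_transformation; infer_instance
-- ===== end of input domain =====

-- B removes A's 2D rail matrix and zip-transpose: it reads the ciphertext directly in
-- column-major order with a single nested index loop (idx = i*num_cols + j).


-- ===== PORT A =====
-- zip(*matrix): emit the list of heads while every row is nonempty (Python's zip stops at the shortest row).
def pyZipStar (m : List (List (List Char))) : List (List (List Char)) :=
  if m = [] ∨ m.any List.isEmpty then []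
  else (m.map fun r => r.headD []) :: pyZipStar (m.map List.tail)
termination_by (m.headD []).length
decreasing_by
  rename_i h
  push_neg at h
  obtain ⟨h1, h2⟩ := h
  rcases m with _ | ⟨r, rest⟩
  · exact absurd rfl h1
  · rcases r with _ | ⟨c, r'⟩
    · simp at h2
    · simp

-- transpose_matrix: [''.join(row) for row in zip(*matrix)]  (a cell is [] for '' or [c] for a char; ''.join = flatten)
def transpose_matrix (matrix : List (List (List Char))) : List (List Char) :=
  (pyZipStar matrix).map List.flatten

-- inner loop of A: for j in range(num_cols): if index < len: rail_matrix[i][j] = ciphertext[index]; index += 1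
def fillRow (cs : List Char) (numCols : Int) (st : List (List Char) × Int) : List (List Char) × Int :=
  (PySem.List.pyRange 0 numCols).foldl (fun st2 j =>
    if st2.2 < (cs.length : Int) then
      (st2.1.set j.toNat [cs.getD st2.2.toNat ' '], st2.2 + 1)
    else st2) st

def row_column_transformation (ciphertext : String) (num_rails : Int) : String :=
  let cs := ciphertext.toList
  let numCols0 := PySem.Int.floordiv (cs.length : Int) num_rails
  let numCols := if PySem.Int.mod (cs.length : Int) num_rails ≠ 0 then numCols0 + 1 else numCols0
  let railMatrix : List (List (List Char)) :=
    (PySem.List.pyRange 0 num_rails).map (fun _ => (PySem.List.pyRange 0 numCols).map (fun _ => []))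
  let filled := ((PySem.List.pyRange 0 num_rails).foldl
      (fun (st : List (List (List Char)) × Int) i =>
        let res := fillRow cs numCols (st.1.getD i.toNat [], st.2)
        (st.1.set i.toNat res.1, res.2)) (railMatrix, 0)).1
  String.mk (transpose_matrix filled).flatten

-- ===== PORT B =====
def row_column_transformation_alt (ciphertext : String) (num_rails : Int) : String :=
  let cs := ciphertext.toList
  let n : Int := cs.length
  let numCols0 := PySem.Int.floordiv n num_rails
  let numCols := if PySem.Int.mod n num_rails ≠ 0 then numCols0 + 1 else numCols0
  let chars := (PySem.List.pyRange 0 numCols).foldl (fun acc j =>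
      (PySem.List.pyRange 0 num_rails).foldl (fun acc2 i =>
        if i * numCols + j < n then acc2 ++ [cs.getD (i * numCols + j).toNat ' '] else acc2) acc) []
  String.mk chars

-- ===== PRECONDITION & SPEC =====
-- Pre_ excludes exactly num_rails = 0, where A raises ZeroDivisionError.
def Pre_row_column_transformation (ciphertext : String) (num_rails : Int) : Prop := num_rails ≠ 0
instance (ciphertext : String) (num_rails : Int) : Decidable (Pre_row_column_transformation ciphertext num_rails) := by unfold Pre_row_column_transformation; infer_instance
def pvWitness_row_column_transformation : String × Int := ("ABCDEFG", 3)

def Spec_row_column_transformation (ciphertext : String) (num_rails : Int) (out : String) : Prop := out = row_column_transformation_alt ciphertext num_rails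
instance (ciphertext : String) (num_rails : Int) (out : String) : Decidable (Spec_row_column_transformation ciphertext num_rails out) := by unfold Spec_row_column_transformation; infer_instance

-- ===== CLAIM (what is proved, stated in full; the proofs are below) =====
def Claim_equal_row_column_transformation : Prop := ∀ (ciphertext : String) (num_rails : Int), Dom_row_column_transformation ciphertext num_rails → Pre_row_column_transformation ciphertext num_rails → Spec_row_column_transformation ciphertext num_rails (row_column_transformation ciphertext num_rails)

-- ===== LEMMAS AND PROOFS =====

-- the i-th row of the conceptual filled matrix (proof-only helper)
def tableRow (cs : List Char) (Cn i : Nat) : List (List Char) :=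
  (List.range Cn).map (fun j => if i * Cn + j < cs.length then [cs.getD (i * Cn + j) ' '] else [])

theorem set_map_range {α : Type} (C k : Nat) (f : Nat → α) (v : α) (hk : k < C) :
    ((List.range C).map f).set k v = (List.range C).map (fun j => if j = k then v else f j) := by
  apply List.ext_getElem
  · simp
  · intro i h1 h2
    simp only [List.getElem_set, List.getElem_map, List.getElem_range]
    rcases eq_or_ne i k with rfl | h
    · simp
    · simp [h, h.symm]

theorem getD_tail {α : Type} (l : List α) (j : Nat) (d : α) (h : l ≠ []) :
    l.tail.getD j d = l.getD (j+1) d := by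
  cases l with
  | nil => simp at h
  | cons a t => simp [List.getD]

theorem headD_eq_getD {α : Type} (l : List α) (d : α) : l.headD d = l.getD 0 d := by
  cases l <;> simp

theorem zipStar_rect : ∀ (Cn : Nat) (rows : List (List (List Char))), rows ≠ [] →
    (∀ r ∈ rows, r.length = Cn) →
    pyZipStar rows = (List.range Cn).map (fun j => rows.map (fun r => r.getD j [])) := by
  intro Cn
  induction Cn with
  | zero =>
    intro rows hne hlen
    rw [pyZipStar]
    rcases rows with _ | ⟨r, rest⟩
    · exact absurd rfl hne
    · have : r = [] := List.length_eq_zero_iff.mp (hlen r (by simp))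
      simp [this]
  | succ C ih =>
    intro rows hne hlen
    have hner : ∀ r ∈ rows, r ≠ [] := by
      intro r hr h0
      have := hlen r hr
      simp [h0] at this
    rw [pyZipStar]
    rw [if_neg]
    · rw [ih (rows.map List.tail) (by simpa using hne)
        (by intro t ht; simp at ht; obtain ⟨r, hr, rfl⟩ := ht
            have := hlen r hr; simp [List.length_tail, this])]
      rw [List.range_succ_eq_map]
      simp only [List.map_cons, List.map_map]
      congr 1
      · apply List.map_congr_left
        intro r hr
        exact headD_eq_getD r []
      · apply List.map_congr_left
        intro j _
        simp only [Function.comp]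
        apply List.map_congr_left
        intro r hr
        exact getD_tail r j [] (hner r hr)
    · rintro (rfl | hany)
      · exact hne rfl
      · rw [List.any_eq_true] at hany
        obtain ⟨r, hr, hemp⟩ := hany
        exact hner r hr (by simpa using hemp)

theorem rowFold (cs : List Char) (C idx0 : Nat) (hid : idx0 ≤ cs.length) : ∀ k, k ≤ C →
    List.foldl (fun (st2 : List (List Char) × Int) j =>
        if st2.2 < (cs.length : Int) then
          (st2.1.set j.toNat [cs.getD st2.2.toNat ' '], st2.2 + 1)
        else st2)
      (List.replicate C ([] : List Char), (idx0 : Int))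
      (List.map (fun (v : Nat) => (v : Int)) (List.range k))
    = ((List.range C).map (fun j =>
          if j < k then (if idx0 + j < cs.length then [cs.getD (idx0 + j) ' '] else []) else []),
       ((min cs.length (idx0 + k) : Nat) : Int)) := by
  intro k
  induction k with
  | zero =>
    intro _
    simp [Nat.min_eq_right hid, List.map_const']
  | succ k ih =>
    intro hk1
    have hk : k ≤ C := by omega
    rw [List.range_succ, List.map_append, List.foldl_append, ih hk]
    simp only [List.map_cons, List.map_nil, List.foldl_cons, List.foldl_nil]
    by_cases h : idx0 + k < cs.length
    · have hmin : min cs.length (idx0 + k) = idx0 + k := by omega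
      rw [hmin]
      rw [if_pos (by exact_mod_cast h)]
      simp only [Int.ofNat_eq_natCast, Int.toNat_natCast]
      rw [set_map_range C k _ _ (by omega)]
      rw [Prod.mk.injEq]
      constructor
      · apply List.map_congr_left
        intro j hj
        rw [List.mem_range] at hj
        rcases eq_or_ne j k with rfl | hne
        · simp [h]
        · rcases Nat.lt_or_ge j k with h3 | h3
          · simp [hne, h3, show j < k + 1 by omega]
          · simp [hne, show ¬ j < k by omega, show ¬ j < k + 1 by omega]
      · have : min cs.length (idx0 + (k + 1)) = idx0 + k + 1 := by omega
        rw [this]; push_cast; ring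
    · have hmin : min cs.length (idx0 + k) = cs.length := by omega
      rw [hmin]
      rw [if_neg (by exact_mod_cast (lt_irrefl (cs.length : Int)))]
      rw [Prod.mk.injEq]
      constructor
      · apply List.map_congr_left
        intro j hj
        rw [List.mem_range] at hj
        rcases Nat.lt_or_ge j k with h2 | h2
        · simp [h2, Nat.lt_succ_of_lt h2]
        · have : ¬ j < k := by omega
          rcases eq_or_ne j k with rfl | hne
          · simp [h]
          · simp [this, show ¬ j < k + 1 by omega]
      · have : min cs.length (idx0 + (k + 1)) = cs.length := by omega
        rw [this]

theorem fillRow_spec (cs : List Char) (C idx0 : Nat) (hid : idx0 ≤ cs.length) :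
    fillRow cs (C : Int) (List.replicate C ([] : List Char), (idx0 : Int))
    = ((List.range C).map (fun j =>
          if idx0 + j < cs.length then [cs.getD (idx0 + j) ' '] else []),
       ((min cs.length (idx0 + C) : Nat) : Int)) := by
  unfold fillRow
  rw [PySem.List.pyRange_zero_natCast]
  rw [rowFold cs C idx0 hid C le_rfl]
  rw [Prod.mk.injEq]
  constructor
  · apply List.map_congr_left
    intro j hj
    rw [List.mem_range] at hj
    simp [hj]
  · rfl

theorem outerFold (cs : List Char) (R Cn : Nat) : ∀ i, i ≤ R →
    List.foldl (fun (st : List (List (List Char)) × Int) iv =>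
        let res := fillRow cs (Cn : Int) (st.1.getD iv.toNat [], st.2)
        (st.1.set iv.toNat res.1, res.2))
      (List.replicate R (List.replicate Cn ([] : List Char)), (0 : Int))
      (List.map (fun (v : Nat) => (v : Int)) (List.range i))
    = ((List.range R).map (fun i' => if i' < i then tableRow cs Cn i' else List.replicate Cn []),
       ((min cs.length (i * Cn) : Nat) : Int)) := by
  intro i
  induction i with
  | zero =>
    intro _
    simp [List.map_const']
  | succ i ih =>
    intro hi1
    have hi : i ≤ R := by omega
    have hiR : i < R := by omega
    rw [List.range_succ, List.map_append, List.foldl_append, ih hi]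
    simp only [List.map_cons, List.map_nil, List.foldl_cons, List.foldl_nil,
      Int.ofNat_eq_natCast, Int.toNat_natCast]
    have hget : ((List.range R).map (fun i' =>
        if i' < i then tableRow cs Cn i' else List.replicate Cn ([] : List Char))).getD i []
        = List.replicate Cn [] := by
      simp [List.getD_eq_getElem?_getD, List.getElem?_map, List.getElem?_range, hiR]
    rw [hget]
    rw [fillRow_spec cs Cn (min cs.length (i * Cn)) (by omega)]
    rw [set_map_range R i _ _ hiR]
    rw [Prod.mk.injEq]
    constructor
    · apply List.map_congr_left
      intro i' hi'
      rw [List.mem_range] at hi'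
      rcases eq_or_ne i' i with rfl | hne
      · simp only [if_pos rfl, if_pos (Nat.lt_succ_self i')]
        unfold tableRow
        apply List.map_congr_left
        intro j hj
        rw [List.mem_range] at hj
        by_cases hcase : i' * Cn < cs.length
        · rw [Nat.min_eq_right (by omega)]
        · rw [Nat.min_eq_left (by omega)]
          rw [if_neg (by omega), if_neg (by omega)]
      · rcases Nat.lt_or_ge i' i with h3 | h3
        · simp [hne, h3, show i' < i + 1 by omega]
        · simp [hne, show ¬ i' < i by omega, show ¬ i' < i + 1 by omega]
    · have : min cs.length (min cs.length (i * Cn) + Cn) = min cs.length ((i + 1) * Cn) := by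
        rw [Nat.succ_mul]
        omega
      rw [this]

theorem flatMap_map_getD_tableRow (cs : List Char) (R Cn : Nat) (j : Nat) (hj : j < Cn) :
    ((List.range R).map (fun i => (tableRow cs Cn i).getD j [])).flatten
    = (List.range R).flatMap (fun i =>
        if i * Cn + j < cs.length then [cs.getD (i * Cn + j) ' '] else []) := by
  rw [← List.flatMap_def]
  apply List.flatMap_congr
  intro i _
  simp [tableRow, List.getD_eq_getElem?_getD, hj]

theorem main_pos (s : String) (r : Int) (hr : 0 < r) :
    row_column_transformation s r = row_column_transformation_alt s r := by
  unfold row_column_transformation row_column_transformation_alt transpose_matrix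
  dsimp only
  set cs := s.toList with hcs
  set nI : Int := (cs.length : Int) with hnI
  set C : Int := (if PySem.Int.mod nI r ≠ 0 then PySem.Int.floordiv nI r + 1
                  else PySem.Int.floordiv nI r) with hCdef
  have hC0nn : 0 ≤ PySem.Int.floordiv nI r := by
    rw [PySem.Int.floordiv_eq_ediv_of_pos hr]
    exact Int.ediv_nonneg (by positivity) (le_of_lt hr)
  have hCnn : 0 ≤ C := by rw [hCdef]; split_ifs <;> omega
  obtain ⟨Cn, hCn⟩ : ∃ Cn : Nat, C = (Cn : Int) := ⟨C.toNat, (Int.toNat_of_nonneg hCnn).symm⟩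
  obtain ⟨R, hR⟩ : ∃ R : Nat, r = (R : Int) :=
    ⟨r.toNat, (Int.toNat_of_nonneg (le_of_lt hr)).symm⟩
  have hRpos : 0 < R := by exact_mod_cast hR ▸ hr
  rw [hCn, hR, PySem.List.pyRange_zero_natCast, PySem.List.pyRange_zero_natCast]
  -- the initial rail matrix is R×Cn of empty cells
  have hmat : (List.map (fun (k : Nat) => (k : Int)) (List.range R)).map
      (fun _ => (List.map (fun (k : Nat) => (k : Int)) (List.range Cn)).map (fun _ => ([] : List Char)))
      = List.replicate R (List.replicate Cn []) := by
    simp [Function.comp_def, List.map_const']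
  rw [hmat]
  -- A's fill loop
  rw [outerFold cs R Cn R le_rfl]
  -- the filled matrix is the table of rows
  have hfilled : (List.range R).map (fun i' => if i' < R then tableRow cs Cn i' else List.replicate Cn []) = (List.range R).map (tableRow cs Cn) := by
    apply List.map_congr_left
    intro i hi
    rw [List.mem_range] at hi
    simp [hi]
  rw [hfilled]
  -- transpose of the rectangular table = list of columns
  rw [zipStar_rect Cn ((List.range R).map (tableRow cs Cn))
      (by simp [List.range_eq_nil, hRpos.ne'])
      (by intro t ht
          simp only [List.mem_map] at ht
          obtain ⟨i, _, rfl⟩ := ht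
          simp [tableRow])]
  -- A's result as a double flatMap over (column, row) indices
  have hA : ((((List.range Cn).map (fun j => ((List.range R).map (tableRow cs Cn)).map
        (fun rw => rw.getD j []))).map List.flatten).flatten)
      = (List.range Cn).flatMap (fun j => (List.range R).flatMap (fun i =>
          if i * Cn + j < cs.length then [cs.getD (i * Cn + j) ' '] else [])) := by
    rw [List.map_map, ← List.flatMap_def]
    apply List.flatMap_congr
    intro j hj
    rw [List.mem_range] at hj
    simp only [Function.comp_def, List.map_map]
    exact flatMap_map_getD_tableRow cs R Cn j hj
  rw [hA]
  -- B's nested fold as the same double flatMap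
  have hinner : ∀ (acc : List Char) (j : Int),
      List.foldl (fun acc2 i => if i * (Cn : Int) + j < nI then acc2 ++ [cs.getD (i * (Cn : Int) + j).toNat ' '] else acc2)
        acc (List.map (fun (v : Nat) => (v : Int)) (List.range R))
      = acc ++ List.flatMap (fun (i : Nat) =>
          if (i : Int) * (Cn : Int) + j < nI then [cs.getD ((i : Int) * (Cn : Int) + j).toNat ' '] else []) (List.range R) := by
    intro acc j
    rw [List.foldl_map]
    rw [show (fun (acc2 : List Char) (i : Nat) =>
          if (i : Int) * (Cn : Int) + j < nI then acc2 ++ [cs.getD ((i : Int) * (Cn : Int) + j).toNat ' '] else acc2)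
        = (fun (acc2 : List Char) (i : Nat) => acc2 ++
            (if (i : Int) * (Cn : Int) + j < nI then [cs.getD ((i : Int) * (Cn : Int) + j).toNat ' '] else [])) from by
      funext acc2 i
      split_ifs <;> simp]
    rw [PySem.List.foldl_append_eq_flatMap]
  rw [List.foldl_map]
  rw [show (fun (acc : List Char) (j : Nat) =>
        List.foldl (fun acc2 i => if i * (Cn : Int) + (j : Int) < nI then acc2 ++ [cs.getD (i * (Cn : Int) + (j : Int)).toNat ' '] else acc2)
          acc (List.map (fun (v : Nat) => (v : Int)) (List.range R)))
      = (fun (acc : List Char) (j : Nat) => acc ++ List.flatMap (fun (i : Nat) =>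
          if (i : Int) * (Cn : Int) + (j : Int) < nI then [cs.getD ((i : Int) * (Cn : Int) + (j : Int)).toNat ' '] else []) (List.range R)) from by
    funext acc j
    exact hinner acc (j : Int)]
  rw [PySem.List.foldl_append_eq_flatMap]
  rw [List.nil_append]
  -- the two flatMaps agree pointwise (cast arithmetic)
  congr 1
  apply List.flatMap_congr
  intro j _
  apply List.flatMap_congr
  intro i _
  have hcast : ((i : Int) * (Cn : Int) + (j : Int)) = ((i * Cn + j : Nat) : Int) := by push_cast; ring
  rw [hcast, Int.toNat_natCast, hnI]
  by_cases h : i * Cn + j < cs.length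
  · rw [if_pos h, if_pos (by exact_mod_cast h)]
  · rw [if_neg h, if_neg (by exact_mod_cast h)]

theorem main_neg (s : String) (r : Int) (hr : r < 0) :
    row_column_transformation s r = row_column_transformation_alt s r := by
  unfold row_column_transformation row_column_transformation_alt transpose_matrix
  dsimp only
  have hrng : PySem.List.pyRange 0 r = [] := by simp [pysem, le_of_lt hr]
  rw [hrng]
  set nI : Int := ((String.toList s).length : Int) with hnI
  have hn : 0 ≤ nI := by rw [hnI]; positivity
  have hqm := PySem.Int.floordiv_mul_add_mod nI r
  have hmb := PySem.Int.mod_neg_bounds nI hr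
  set q := PySem.Int.floordiv nI r with hq
  set m := PySem.Int.mod nI r with hm
  have hC : (if m ≠ 0 then q + 1 else q) ≤ 0 := by
    split_ifs with h0
    · by_contra hq1
      push_neg at hq1
      have hq0 : 0 ≤ q := by omega
      have : q * r ≤ 0 := mul_nonpos_iff.mpr (Or.inl ⟨hq0, le_of_lt hr⟩)
      omega
    · by_contra hq1
      push_neg at hq1
      have : q * r < 0 := mul_neg_of_pos_of_neg hq1 hr
      omega
  have hrngC : PySem.List.pyRange 0 (if m ≠ 0 then q + 1 else q) = [] := by
    have hC' : (if m = 0 then q else q + 1) ≤ 0 := by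
      split_ifs with h0
      · simpa [h0] using hC
      · simpa [h0] using hC
    simp [pysem, hC']
  rw [hrngC]
  simp [pyZipStar]

-- ===== VERDICT (by name: the statement is the Claim_ definition above) =====
theorem row_column_transformation_spec : Claim_equal_row_column_transformation := by
  intro s r _ hpre
  unfold Spec_row_column_transformation
  rcases lt_or_gt_of_ne hpre with h | h
  · exact main_neg s r h
  · exact main_pos s r h
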